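-- pv_equiv track=rewrite | github.com/Houston4444/RaySession | src/daemon/osc_server_thread.py | _path_is_valid
-- ===== SOURCE A (Python) =====
-- def _path_is_valid(path: str) -> bool:
--     if path.startswith(('./', '../')):
--         return False
--
--     for forbidden in ('//', '/./', '/../'):
--         if forbidden in path:
--             return False
--
--     if path.endswith(('/.', '/..')):
--         return False
--     return True
-- ===== SOURCE B (Python) =====
-- def _path_is_valid(path: str) -> bool:
--     segs = path.split('/')
--     n = len(segs)
--     if n == 1:
--         return True
--     for i, seg in enumerate(segs):
--         if seg in ('.', '..'):
--             return False
--         if seg == '' and 0 < i < n - 1: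
--             return False
--     return True
-- ===== Notes on version B (the rewrite author's own statement) =====
-- stated objective: alternative
-- what changed: B splits the path on '/' and checks each segment in one pass (reject '.'/'..' segments and empty interior segments when a slash is present) instead of A's seven prefix/substring/suffix pattern scans.
import Mathlib
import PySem

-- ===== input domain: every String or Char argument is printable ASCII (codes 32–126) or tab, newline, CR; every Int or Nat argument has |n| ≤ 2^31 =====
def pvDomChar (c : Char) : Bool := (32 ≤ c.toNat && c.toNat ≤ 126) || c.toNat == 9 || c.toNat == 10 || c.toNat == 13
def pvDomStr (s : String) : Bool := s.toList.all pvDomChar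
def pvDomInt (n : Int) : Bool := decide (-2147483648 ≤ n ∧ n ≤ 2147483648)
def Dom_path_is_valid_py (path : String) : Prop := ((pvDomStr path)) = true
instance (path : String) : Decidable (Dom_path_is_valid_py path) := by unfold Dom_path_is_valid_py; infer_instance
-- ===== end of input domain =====

-- B replaces A's prefix/substring/suffix scans by one pass over the '/'-separated segments (objective: alternative decomposition; same behaviour).

-- ===== PORT A =====
def path_is_valid_py (path : String) : Bool :=
  if PySem.Str.startswith path "./" || PySem.Str.startswith path "../" then false
  else if [("//" : String), "/./", "/../"].any (fun f => PySem.Str.isIn f path) then false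
  else if PySem.Str.endswith path "/." || PySem.Str.endswith path "/.." then false
  else true

-- ===== PORT B =====
-- the loop 'for i, seg in enumerate(segs): …' of Source B
def pvSegCheck (n : Nat) (i : Nat) : List (List Char) → Bool
  | [] => true
  | seg :: rest =>
    if seg == ['.'] || seg == ['.', '.'] then false
    else if seg == ([] : List Char) && decide (0 < i) && decide (i < n - 1) then false
    else pvSegCheck n (i + 1) rest

def path_is_valid_py_alt (path : String) : Bool :=
  let segs := PySem.Chars.splitOn path.toList ['/']
  let n := segs.length
  if n == 1 then true
  else pvSegCheck n 0 segs

-- ===== PRECONDITION & SPEC =====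
def Spec_path_is_valid_py (path : String) (out : Bool) : Prop := out = path_is_valid_py_alt path
instance (path : String) (out : Bool) : Decidable (Spec_path_is_valid_py path out) := by unfold Spec_path_is_valid_py; infer_instance

-- ===== CLAIM (what is proved, stated in full; the proofs are below) =====
def Claim_equal_path_is_valid_py : Prop := ∀ (path : String), Dom_path_is_valid_py path → Spec_path_is_valid_py path (path_is_valid_py path)

-- ===== LEMMAS AND PROOFS =====

-- a clean structural recursion equal to PySem.Chars.splitOn with a one-character separator
def pvSplit (sep : Char) : List Char → List (List Char)
  | [] => [[]]
  | c :: cs =>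
    if c = sep then [] :: pvSplit sep cs
    else match pvSplit sep cs with
      | [] => [[c]]
      | h :: t => (c :: h) :: t

-- the separator-joined inverse of pvSplit
def pvGlue (sep : Char) : List (List Char) → List Char
  | [] => []
  | [x] => x
  | x :: y :: t => x ++ sep :: pvGlue sep (y :: t)

theorem pvSplit_ne_nil (sep : Char) (cs : List Char) : pvSplit sep cs ≠ [] := by
  induction cs with
  | nil => simp [pvSplit]
  | cons c cs ih =>
    simp only [pvSplit]
    split
    · simp
    · cases h : pvSplit sep cs <;> simp

theorem pvSplit_go_eq (sep : Char) (l : List Char) :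
    ∀ (fuel : Nat) (cur : List Char) (acc : List (List Char)), l.length ≤ fuel →
    PySem.Chars.splitOn.go [sep] fuel l cur acc =
      acc.reverse ++ ((cur.reverse ++ (pvSplit sep l).headI) :: (pvSplit sep l).tail) := by
  induction l with
  | nil =>
    intro fuel cur acc _
    cases fuel <;> simp [PySem.Chars.splitOn.go, pvSplit]
  | cons c cs ih =>
    intro fuel cur acc hf
    cases fuel with
    | zero => simp at hf
    | succ f =>
      simp only [PySem.Chars.splitOn.go]
      by_cases hc : c = sep
      · have hpre : List.isPrefixOf [sep] (c :: cs) = true := by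
          simp [hc, List.isPrefixOf]
        rw [if_pos hpre]
        have : List.drop (List.length [sep]) (c :: cs) = cs := by simp
        rw [this, ih f [] (cur.reverse :: acc) (by simpa using Nat.le_of_succ_le_succ hf)]
        cases h : pvSplit sep cs with
        | nil => exact absurd h (pvSplit_ne_nil sep cs)
        | cons x t => simp [pvSplit, hc, h, List.headI]
      · have hpre : List.isPrefixOf [sep] (c :: cs) = false := by
          rw [Bool.eq_false_iff]
          intro h
          rw [List.isPrefixOf_iff_prefix, List.cons_prefix_cons] at h
          exact hc h.1.symm
        rw [if_neg (by simp [hpre])]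
        rw [ih f (c :: cur) acc (by simpa using Nat.le_of_succ_le_succ hf)]
        simp only [pvSplit, if_neg hc]
        cases h : pvSplit sep cs with
        | nil => exact absurd h (pvSplit_ne_nil sep cs)
        | cons x t => simp [List.headI]

theorem splitOn_eq_pvSplit (sep : Char) (cs : List Char) :
    PySem.Chars.splitOn cs [sep] = pvSplit sep cs := by
  rw [PySem.Chars.splitOn, pvSplit_go_eq sep cs (cs.length + 1) [] [] (Nat.le_succ _)]
  cases h : pvSplit sep cs with
  | nil => exact absurd h (pvSplit_ne_nil sep cs)
  | cons x t => simp [List.headI]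

theorem pvSplit_sepfree (sep : Char) (cs : List Char) :
    ∀ seg ∈ pvSplit sep cs, sep ∉ seg := by
  induction cs with
  | nil => simp [pvSplit]
  | cons c cs ih =>
    simp only [pvSplit]
    by_cases hc : c = sep
    · rw [if_pos hc]
      intro seg hseg
      rcases List.mem_cons.1 hseg with h | h
      · simp [h]
      · exact ih seg h
    · rw [if_neg hc]
      cases h : pvSplit sep cs with
      | nil => exact absurd h (pvSplit_ne_nil sep cs)
      | cons x t =>
        intro seg hseg
        rcases List.mem_cons.1 hseg with h1 | h1
        · subst h1
          intro hmem
          rcases List.mem_cons.1 hmem with h2 | h2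
          · exact hc h2.symm
          · exact ih x (h ▸ List.mem_cons_self) h2
        · exact ih seg (h ▸ List.mem_cons_of_mem x h1)

theorem pvGlue_pvSplit (sep : Char) (cs : List Char) :
    pvGlue sep (pvSplit sep cs) = cs := by
  induction cs with
  | nil => simp [pvSplit, pvGlue]
  | cons c cs ih =>
    simp only [pvSplit]
    by_cases hc : c = sep
    · rw [if_pos hc]
      cases h : pvSplit sep cs with
      | nil => exact absurd h (pvSplit_ne_nil sep cs)
      | cons x t =>
        rw [h] at ih
        simp [pvGlue, hc, ih]
    · rw [if_neg hc]
      cases h : pvSplit sep cs with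
      | nil => exact absurd h (pvSplit_ne_nil sep cs)
      | cons x t =>
        rw [h] at ih
        cases t with
        | nil => simpa [pvGlue] using congrArg (c :: ·) ih
        | cons y t' => simpa [pvGlue] using congrArg (c :: ·) ih

-- a pattern containing sep cannot occur inside a sep-free list
theorem no_infix_of_sep (sep : Char) (p s : List Char) (hp : sep ∈ p) (hs : sep ∉ s) :
    ¬ p <:+: s := fun h => hs (List.IsInfix.mem hp h)

theorem prefix_word (sep : Char) :
    ∀ (w x : List Char) (u : List Char), sep ∉ w → sep ∉ x →
    ((w ++ [sep]) <+: (x ++ sep :: u) ↔ w = x) := by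
  intro w
  induction w with
  | nil =>
    intro x u _ hx
    cases x with
    | nil => simp
    | cons a x' =>
      simp only [List.nil_append]
      constructor
      · intro h
        rw [List.cons_append, List.cons_prefix_cons] at h
        exact absurd h.1.symm (fun he => hx (he ▸ List.mem_cons_self))
      · intro h; exact absurd h.symm (List.cons_ne_nil a x')
  | cons a w' ih =>
    intro x u hw hx
    cases x with
    | nil =>
      simp only [List.nil_append, List.cons_append, List.cons_prefix_cons]
      constructor
      · intro ⟨h1, _⟩; exact absurd h1 (fun he => hw (he ▸ List.mem_cons_self))
      · intro h; exact absurd h (List.cons_ne_nil a w')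
    | cons b x' =>
      simp only [List.cons_append, List.cons_prefix_cons]
      rw [ih x' u (fun h => hw (List.mem_cons_of_mem a h)) (fun h => hx (List.mem_cons_of_mem b h))]
      constructor
      · intro ⟨h1, h2⟩; rw [h1, h2]
      · intro h
        injection h with h1 h2
        exact ⟨h1, h2⟩

-- an occurrence starting with sep skips a sep-free block
theorem infix_skip (sep : Char) :
    ∀ (x : List Char) (p v : List Char), sep ∉ x →
    ((sep :: p) <:+: (x ++ sep :: v) ↔ (sep :: p) <:+: (sep :: v)) := by
  intro x
  induction x with
  | nil => intro p v _; simp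
  | cons a x' ih =>
    intro p v hx
    rw [List.cons_append, List.infix_cons_iff]
    constructor
    · intro h
      rcases h with h | h
      · rw [List.cons_prefix_cons] at h
        exact absurd h.1 (fun he => hx (he ▸ List.mem_cons_self))
      · exact (ih p v (fun h' => hx (List.mem_cons_of_mem a h'))).1 h
    · intro h
      exact Or.inr ((ih p v (fun h' => hx (List.mem_cons_of_mem a h'))).2 h)

-- glue of two or more segments contains sep
theorem sep_mem_pvGlue (sep : Char) (x y : List Char) (t : List (List Char)) :
    sep ∈ pvGlue sep (x :: y :: t) := by
  simp [pvGlue]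

-- '/x' suffix ⟷ x is the last of at least two segments
theorem suffix_word (sep : Char) :
    ∀ (segs : List (List Char)) (w : List Char),
    (∀ s ∈ segs, sep ∉ s) → sep ∉ w →
    ((sep :: w) <:+ pvGlue sep segs ↔ 2 ≤ segs.length ∧ segs.getLast? = some w) := by
  intro segs
  induction segs with
  | nil =>
    intro w _ _
    simp [pvGlue]
  | cons x t ih =>
    intro w hsf hw
    cases t with
    | nil =>
      simp only [pvGlue]
      constructor
      · intro h
        exact absurd (List.IsSuffix.mem List.mem_cons_self h) (hsf x List.mem_cons_self)
      · intro ⟨h2, _⟩; simp at h2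
    | cons y t' =>
      have hglue : pvGlue sep (x :: y :: t') = x ++ sep :: pvGlue sep (y :: t') := rfl
      rw [hglue]
      constructor
      · intro h
        have hsv : (sep :: pvGlue sep (y :: t')) <:+ (x ++ sep :: pvGlue sep (y :: t')) :=
          ⟨x, rfl⟩
        rcases List.suffix_or_suffix_of_suffix h hsv with h1 | h1
        · -- sep :: w is a suffix of sep :: v
          rcases h1 with ⟨pre, hpre⟩
          cases pre with
          | nil =>
            -- w = pvGlue (y :: t')
            simp only [List.nil_append] at hpre
            injection hpre with _ h2
            cases t' with
            | nil =>
              simp only [pvGlue] at h2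
              exact ⟨by simp, by simp [h2]⟩
            | cons z t'' =>
              exact absurd (h2 ▸ sep_mem_pvGlue sep y z t'') hw
          | cons a pre' =>
            injection hpre with _ h2
            -- sep :: w <:+ pvGlue (y :: t')
            have hsw : (sep :: w) <:+ pvGlue sep (y :: t') := ⟨pre', h2⟩
            have := (ih w (fun s hs => hsf s (List.mem_cons_of_mem x hs)) hw).1 hsw
            refine ⟨by simp, ?_⟩
            rw [List.getLast?_cons_cons]
            exact this.2
        · -- sep :: v suffix of sep :: w : forces sep ∈ w or equality
          rcases h1 with ⟨pre, hpre⟩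
          cases pre with
          | nil =>
            simp only [List.nil_append] at hpre
            injection hpre with _ h2
            cases t' with
            | nil =>
              simp only [pvGlue] at h2
              exact ⟨by simp, by simp [h2]⟩
            | cons z t'' =>
              exact absurd (h2.symm ▸ sep_mem_pvGlue sep y z t'') hw
          | cons a pre' =>
            injection hpre with h1' h2
            exact absurd (h2 ▸ (List.mem_append_right pre' List.mem_cons_self)) hw
      · intro ⟨hlen, hlast⟩
        rw [List.getLast?_cons_cons] at hlast
        cases t' with
        | nil =>
          simp at hlast
          subst hlast
          exact ⟨x, by simp [pvGlue]⟩
        | cons z t'' =>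
          have := (ih w (fun s hs => hsf s (List.mem_cons_of_mem x hs)) hw).2
            ⟨by simp, hlast⟩
          rcases this with ⟨pre, hpre⟩
          exact ⟨x ++ sep :: pre, by rw [List.append_assoc, List.cons_append, hpre]⟩

-- '/x/' infix ⟷ x is an interior segment
theorem infix_word (sep : Char) :
    ∀ (segs : List (List Char)) (w : List Char),
    (∀ s ∈ segs, sep ∉ s) → sep ∉ w →
    ((sep :: (w ++ [sep])) <:+: pvGlue sep segs ↔
      ∃ i, 0 < i ∧ i + 1 < segs.length ∧ segs[i]? = some w) := by
  intro segs
  induction segs with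
  | nil =>
    intro w _ _
    simp [pvGlue]
  | cons x t ih =>
    intro w hsf hw
    cases t with
    | nil =>
      simp only [pvGlue]
      constructor
      · intro h
        exact absurd h (no_infix_of_sep sep _ _ List.mem_cons_self (hsf x List.mem_cons_self))
      · intro ⟨i, hi, hlen, _⟩; simp at hlen
    | cons y t' =>
      have hglue : pvGlue sep (x :: y :: t') = x ++ sep :: pvGlue sep (y :: t') := rfl
      rw [hglue, infix_skip sep x _ _ (hsf x List.mem_cons_self), List.infix_cons_iff]
      have hysf : ∀ s ∈ y :: t', sep ∉ s := fun s hs => hsf s (List.mem_cons_of_mem x hs)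
      constructor
      · intro h
        rcases h with h | h
        · -- prefix: sep :: w ++ [sep] <+: sep :: glue (y :: t')
          rw [List.cons_prefix_cons] at h
          have hpw : (w ++ [sep]) <+: pvGlue sep (y :: t') := h.2
          cases t' with
          | nil =>
            simp only [pvGlue] at hpw
            exact absurd hpw (fun hp =>
              (hysf y List.mem_cons_self)
                (List.IsPrefix.mem (List.mem_append_right w List.mem_cons_self) hp))
          | cons z t'' =>
            have : w = y := by
              have := prefix_word sep w y (pvGlue sep (z :: t'')) hw (hysf y List.mem_cons_self)
              exact this.1 (by simpa [pvGlue] using hpw)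
            exact ⟨1, by omega, by simp, by simp [this]⟩
        · -- interior of the tail
          rcases (ih w hysf hw).1 h with ⟨i, hi, hlen, hget⟩
          refine ⟨i + 1, by omega, ?_, ?_⟩
          · simpa using Nat.succ_lt_succ hlen
          · simpa using hget
      · intro ⟨i, hi, hlen, hget⟩
        cases i with
        | zero => omega
        | succ i' =>
          cases i' with
          | zero =>
            -- segs[1] = w, so y = w; need length ≥ 3
            simp at hget
            subst hget
            cases t' with
            | nil => simp at hlen
            | cons z t'' =>
              left
              rw [List.cons_prefix_cons]
              exact ⟨rfl, (prefix_word sep y y (pvGlue sep (z :: t'')) hw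
                (hysf y List.mem_cons_self)).2 rfl⟩
          | succ i'' =>
            right
            refine (ih w hysf hw).2 ⟨i'' + 1, by omega, by simp at hlen ⊢; omega, ?_⟩
            simpa using hget

-- pvSegCheck characterization
theorem pvSegCheck_iff (n : Nat) :
    ∀ (l : List (List Char)) (i : Nat),
    (pvSegCheck n i l = true ↔
      ∀ j seg, l[j]? = some seg →
        ¬(seg = ['.'] ∨ seg = ['.', '.'] ∨ (seg = [] ∧ 0 < i + j ∧ i + j < n - 1))) := by
  intro l
  induction l with
  | nil => intro i; simp [pvSegCheck]
  | cons seg rest ih =>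
    intro i
    simp only [pvSegCheck]
    by_cases h1 : seg = ['.'] ∨ seg = ['.', '.']
    · rw [if_pos (by rcases h1 with h | h <;> simp [h])]
      simp only [Bool.false_eq_true, false_iff, not_forall]
      exact ⟨0, seg, by simp, by tauto⟩
    · rw [if_neg (by push_neg at h1; simp [h1.1, h1.2])]
      by_cases h2 : seg = [] ∧ 0 < i ∧ i < n - 1
      · rw [if_pos (by simp [h2.1, h2.2.1, h2.2.2])]
        simp only [Bool.false_eq_true, false_iff, not_forall]
        exact ⟨0, seg, by simp, by simp only [Nat.add_zero]; tauto⟩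
      · have : (seg == ([] : List Char) && decide (0 < i) && decide (i < n - 1)) = false := by
          rcases Decidable.not_and_iff_or_not.1 h2 with h | h
          · simp [h]
          · rcases Decidable.not_and_iff_or_not.1 h with h | h <;> simp [h]
        rw [if_neg (by rw [this]; simp)]
        rw [ih (i + 1)]
        constructor
        · intro hall j seg' hget hbad
          cases j with
          | zero =>
            simp at hget
            subst hget
            rcases hbad with h | h | h
            · exact h1 (Or.inl h)
            · exact h1 (Or.inr h)
            · exact h2 ⟨h.1, by simpa using h.2⟩
          | succ j' =>
            exact hall j' seg' (by simpa using hget)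
              (by rcases hbad with h | h | h
                  · exact Or.inl h
                  · exact Or.inr (Or.inl h)
                  · exact Or.inr (Or.inr ⟨h.1, by omega, by omega⟩))
        · intro hall j seg' hget hbad
          exact hall (j + 1) seg' (by simpa using hget)
            (by rcases hbad with h | h | h
                · exact Or.inl h
                · exact Or.inr (Or.inl h)
                · exact Or.inr (Or.inr ⟨h.1, by omega, by omega⟩))

-- A's three kinds of checks are all vacuous on a '/'-free string
theorem pfx_false_of_sepfree (w s : List Char) (hw : '/' ∈ w) (hs : '/' ∉ s) :
    List.isPrefixOf w s = false := by
  rw [Bool.eq_false_iff]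
  intro h
  exact hs ((List.isPrefixOf_iff_prefix.1 h).subset hw)

theorem sfx_false_of_sepfree (w s : List Char) (hw : '/' ∈ w) (hs : '/' ∉ s) :
    List.isSuffixOf w s = false := by
  rw [Bool.eq_false_iff]
  intro h
  exact hs ((List.isSuffixOf_iff_suffix.1 h).subset hw)

theorem isIn_false_of_sepfree (w s : List Char) (hw : '/' ∈ w) (hs : '/' ∉ s) :
    PySem.Chars.isIn w s = false := by
  rw [Bool.eq_false_iff]
  intro h
  exact hs (((PySem.Chars.isIn_iff_infix w s).1 h).subset hw)

-- the whole equivalence, stated on char lists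
theorem main_key (cs : List Char) :
    (if List.isPrefixOf ['.', '/'] cs || List.isPrefixOf ['.', '.', '/'] cs then false
     else if [['/', '/'], ['/', '.', '/'], ['/', '.', '.', '/']].any
         (fun f => PySem.Chars.isIn f cs) then false
     else if List.isSuffixOf ['/', '.'] cs || List.isSuffixOf ['/', '.', '.'] cs then false
     else true)
    = (if (PySem.Chars.splitOn cs ['/']).length == 1 then true
       else pvSegCheck (PySem.Chars.splitOn cs ['/']).length 0 (PySem.Chars.splitOn cs ['/'])) := by
  rw [splitOn_eq_pvSplit]
  have hglue := pvGlue_pvSplit '/' cs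
  have hsf := pvSplit_sepfree '/' cs
  rcases he : pvSplit '/' cs with _ | ⟨h, t⟩
  · exact absurd he (pvSplit_ne_nil '/' cs)
  · rw [he] at hglue hsf
    rw [← hglue]
    cases t with
    | nil =>
      have hx : '/' ∉ h := hsf h List.mem_cons_self
      have hg : pvGlue '/' [h] = h := rfl
      rw [hg]
      have p1 := pfx_false_of_sepfree ['.', '/'] h (by simp) hx
      have p2 := pfx_false_of_sepfree ['.', '.', '/'] h (by simp) hx
      have q1 := isIn_false_of_sepfree ['/', '/'] h (by simp) hx
      have q2 := isIn_false_of_sepfree ['/', '.', '/'] h (by simp) hx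
      have q3 := isIn_false_of_sepfree ['/', '.', '.', '/'] h (by simp) hx
      have r1 := sfx_false_of_sepfree ['/', '.'] h (by simp) hx
      have r2 := sfx_false_of_sepfree ['/', '.', '.'] h (by simp) hx
      simp only [p1, p2, r1, r2]
      simp
      exact ⟨q1, q2, q3⟩
    | cons y t' =>
      have hrfl : pvGlue '/' (h :: y :: t') = h ++ '/' :: pvGlue '/' (y :: t') := rfl
      have hhd : '/' ∉ h := hsf h List.mem_cons_self
      -- characterize each of A's conditions in terms of the segments
      have hc1a : List.isPrefixOf ['.', '/'] (pvGlue '/' (h :: y :: t')) = true ↔ h = ['.'] := by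
        rw [List.isPrefixOf_iff_prefix, hrfl]
        simpa [eq_comm] using prefix_word '/' ['.'] h (pvGlue '/' (y :: t')) (by simp) hhd
      have hc1b : List.isPrefixOf ['.', '.', '/'] (pvGlue '/' (h :: y :: t')) = true ↔
          h = ['.', '.'] := by
        rw [List.isPrefixOf_iff_prefix, hrfl]
        simpa [eq_comm] using prefix_word '/' ['.', '.'] h (pvGlue '/' (y :: t')) (by simp) hhd
      have hc2a : PySem.Chars.isIn ['/', '/'] (pvGlue '/' (h :: y :: t')) = true ↔
          ∃ i, 0 < i ∧ i + 1 < (h :: y :: t').length ∧ (h :: y :: t')[i]? = some [] := by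
        rw [PySem.Chars.isIn_iff_infix]
        simpa using infix_word '/' (h :: y :: t') [] hsf (by simp)
      have hc2b : PySem.Chars.isIn ['/', '.', '/'] (pvGlue '/' (h :: y :: t')) = true ↔
          ∃ i, 0 < i ∧ i + 1 < (h :: y :: t').length ∧ (h :: y :: t')[i]? = some ['.'] := by
        rw [PySem.Chars.isIn_iff_infix]
        simpa using infix_word '/' (h :: y :: t') ['.'] hsf (by simp)
      have hc2c : PySem.Chars.isIn ['/', '.', '.', '/'] (pvGlue '/' (h :: y :: t')) = true ↔
          ∃ i, 0 < i ∧ i + 1 < (h :: y :: t').length ∧ (h :: y :: t')[i]? = some ['.', '.'] := by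
        rw [PySem.Chars.isIn_iff_infix]
        simpa using infix_word '/' (h :: y :: t') ['.', '.'] hsf (by simp)
      have hc3a : List.isSuffixOf ['/', '.'] (pvGlue '/' (h :: y :: t')) = true ↔
          2 ≤ (h :: y :: t').length ∧ (h :: y :: t').getLast? = some ['.'] := by
        rw [List.isSuffixOf_iff_suffix]
        simpa using suffix_word '/' (h :: y :: t') ['.'] hsf (by simp)
      have hc3b : List.isSuffixOf ['/', '.', '.'] (pvGlue '/' (h :: y :: t')) = true ↔
          2 ≤ (h :: y :: t').length ∧ (h :: y :: t').getLast? = some ['.', '.'] := by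
        rw [List.isSuffixOf_iff_suffix]
        simpa using suffix_word '/' (h :: y :: t') ['.', '.'] hsf (by simp)
      have hB := pvSegCheck_iff (h :: y :: t').length (h :: y :: t') 0
      have hlen1 : ((h :: y :: t').length == 1) = false := by simp
      rw [hlen1]
      simp only [Bool.false_eq_true, if_false]
      rw [Bool.eq_iff_iff]
      constructor
      · -- A valid → every segment passes B's test
        intro hA
        split_ifs at hA with h1 h2 h3
        rw [Bool.or_eq_true] at h1 h3
        push_neg at h1 h3
        simp only [List.any_cons, List.any_nil, Bool.or_eq_true, Bool.false_eq_true, or_false] at h2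
        push_neg at h2
        rw [hB]
        intro j seg hget hbad
        have hj : j < (h :: y :: t').length := by
          rcases List.getElem?_eq_some_iff.1 hget with ⟨hj, _⟩
          exact hj
        rcases hbad with hb | hb | hb
        · -- seg = ['.']
          subst hb
          rcases Nat.eq_zero_or_pos j with hj0 | hjpos
          · subst hj0
            simp only [List.getElem?_cons_zero, Option.some.injEq] at hget
            exact h1.1 (hc1a.2 hget)
          · by_cases hjl : j + 1 < (h :: y :: t').length
            · exact h2.2.1 (hc2b.2 ⟨j, hjpos, hjl, hget⟩)
            · have hjeq : j = (h :: y :: t').length - 1 := by omega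
              exact h3.1 (hc3a.2 ⟨by simp, by rw [List.getLast?_eq_getElem?, ← hjeq]; exact hget⟩)
        · -- seg = ['.', '.']
          subst hb
          rcases Nat.eq_zero_or_pos j with hj0 | hjpos
          · subst hj0
            simp only [List.getElem?_cons_zero, Option.some.injEq] at hget
            exact h1.2 (hc1b.2 hget)
          · by_cases hjl : j + 1 < (h :: y :: t').length
            · exact h2.2.2 (hc2c.2 ⟨j, hjpos, hjl, hget⟩)
            · have hjeq : j = (h :: y :: t').length - 1 := by omega
              exact h3.2 (hc3b.2 ⟨by simp, by rw [List.getLast?_eq_getElem?, ← hjeq]; exact hget⟩)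
        · -- seg = [] in the interior
          rcases hb with ⟨hb, hj1, hj2⟩
          subst hb
          exact h2.1 (hc2a.2 ⟨j, by omega, by omega, hget⟩)
      · -- every segment passes B's test → A valid
        intro hBt
        rw [hB] at hBt
        have hn1 : (List.isPrefixOf ['.', '/'] (pvGlue '/' (h :: y :: t')) ||
            List.isPrefixOf ['.', '.', '/'] (pvGlue '/' (h :: y :: t'))) = false := by
          rw [Bool.or_eq_false_iff, Bool.eq_false_iff, Bool.eq_false_iff]
          constructor
          · intro hp
            exact hBt 0 h (by simp) (Or.inl (hc1a.1 hp))
          · intro hp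
            exact hBt 0 h (by simp) (Or.inr (Or.inl (hc1b.1 hp)))
        have hn2 : ([['/', '/'], ['/', '.', '/'], ['/', '.', '.', '/']].any
            (fun f => PySem.Chars.isIn f (pvGlue '/' (h :: y :: t')))) = false := by
          rw [Bool.eq_false_iff]
          intro hp
          simp only [List.any_cons, List.any_nil, Bool.or_eq_true, Bool.false_eq_true,
            or_false] at hp
          rcases hp with hp | hp | hp
          · rcases hc2a.1 hp with ⟨i, hi, hil, hget⟩
            exact hBt i [] hget (Or.inr (Or.inr ⟨rfl, by omega, by omega⟩))
          · rcases hc2b.1 hp with ⟨i, hi, hil, hget⟩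
            exact hBt i ['.'] hget (Or.inl rfl)
          · rcases hc2c.1 hp with ⟨i, hi, hil, hget⟩
            exact hBt i ['.', '.'] hget (Or.inr (Or.inl rfl))
        have hn3 : (List.isSuffixOf ['/', '.'] (pvGlue '/' (h :: y :: t')) ||
            List.isSuffixOf ['/', '.', '.'] (pvGlue '/' (h :: y :: t'))) = false := by
          rw [Bool.or_eq_false_iff, Bool.eq_false_iff, Bool.eq_false_iff]
          constructor
          · intro hp
            rcases hc3a.1 hp with ⟨_, hlast⟩
            rw [List.getLast?_eq_getElem?] at hlast
            exact hBt _ ['.'] hlast (Or.inl rfl)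
          · intro hp
            rcases hc3b.1 hp with ⟨_, hlast⟩
            rw [List.getLast?_eq_getElem?] at hlast
            exact hBt _ ['.', '.'] hlast (Or.inr (Or.inl rfl))
        simp [hn1, hn2, hn3]

-- ===== VERDICT (by name: the statement is the Claim_ definition above) =====
theorem path_is_valid_py_spec : Claim_equal_path_is_valid_py := by
  intro path _
  show path_is_valid_py path = path_is_valid_py_alt path
  exact main_key path.toList
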